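-- pv_equiv track=rewrite | github.com/oscar-davids/geokeytool | updatebtcdb.py | Parse128Bit
-- ===== SOURCE A (Python) =====
-- def Parse128Bit(utdata, offset=0):
--
--     data = utdata[offset:offset+2]
--     offset += 2
--     more_bytes = int(data, 16) & 0x80
--
--     while more_bytes:
--         data += utdata[offset:offset+2]
--         more_bytes = int(utdata[offset:offset+2], 16) & 0x80
--         offset += 2
--
--     return data, offset
-- ===== SOURCE B (Python) =====
-- def Parse128Bit(utdata, offset=0):
--     start = offset
--     while int(utdata[offset:offset+2], 16) & 0x80:
--         offset += 2
--     offset += 2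
--     return utdata[start:offset], offset
-- ===== Notes on version B (the rewrite author's own statement) =====
-- stated objective: simpler
-- what changed: B maintains only the running offset and returns one contiguous slice utdata[start:offset] at the end, instead of A's accumulator string grown by appending each 2-char pair inside the loop.
import Mathlib
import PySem

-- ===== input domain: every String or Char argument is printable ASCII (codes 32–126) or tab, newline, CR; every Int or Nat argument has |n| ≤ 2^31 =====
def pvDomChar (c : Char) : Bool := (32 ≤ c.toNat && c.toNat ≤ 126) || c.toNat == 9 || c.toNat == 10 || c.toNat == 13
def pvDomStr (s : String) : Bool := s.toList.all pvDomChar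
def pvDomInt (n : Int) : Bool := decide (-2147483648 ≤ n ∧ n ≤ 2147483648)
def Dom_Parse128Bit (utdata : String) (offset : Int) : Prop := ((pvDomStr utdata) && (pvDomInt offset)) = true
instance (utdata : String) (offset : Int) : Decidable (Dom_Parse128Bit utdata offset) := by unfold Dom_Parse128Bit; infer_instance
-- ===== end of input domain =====

-- B tracks only the running offset and returns one contiguous slice at the end,
-- instead of A's growing accumulator string appended to pair by pair (objective: simpler).

-- int(s, 16), shared by both ports (both Pythons call int(·,16) on the same 2-char slices)
def hex16? (cs : List Char) : Option Int := PySem.Int.ofCharsBase? cs 16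

-- ===== PORT A =====
-- the while loop; fuel is a totality device (always sufficient on inputs where A returns);
-- none = the ValueError Python raises on a non-hex / empty slice (excluded by Pre_)
def pvA_loop (l : List Char) (fuel : Nat) (data : List Char) (offset : Int) (more : Bool) :
    Option (List Char × Int) :=
  if more then
    match fuel with
    | 0 => none
    | fuel' + 1 =>
      let d := PySem.List.slice l (some offset) (some (offset + 2))
      match hex16? (PySem.List.slice l (some offset) (some (offset + 2))) with
      | none => none
      | some v => pvA_loop l fuel' (data ++ d) (offset + 2) (PySem.Int.band v 128 != 0)
  else some (data, offset)

def Parse128Bit (utdata : String) (offset : Int) : String × Int :=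
  let l := utdata.toList
  let data := PySem.List.slice l (some offset) (some (offset + 2))
  match hex16? data with
  | none => ("", 0)  -- int(data,16) raises ValueError; outside Pre_
  | some v =>
    match pvA_loop l (l.length + 2 + offset.natAbs) data (offset + 2) (PySem.Int.band v 128 != 0) with
    | some (d, o) => (String.ofList d, o)
    | none => ("", 0)  -- ValueError inside the loop; outside Pre_

-- ===== PORT B =====
-- the while loop of Source B: only the offset is maintained; returns the offset at which the
-- continuation test first fails, none = the ValueError Python raises there
def pvB_loop (l : List Char) (fuel : Nat) (offset : Int) : Option Int :=
  match fuel with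
  | 0 => none
  | fuel' + 1 =>
    match hex16? (PySem.List.slice l (some offset) (some (offset + 2))) with
    | none => none
    | some v =>
      if PySem.Int.band v 128 != 0 then pvB_loop l fuel' (offset + 2) else some offset

def Parse128Bit_alt (utdata : String) (offset : Int) : String × Int :=
  let l := utdata.toList
  match pvB_loop l (l.length + 2 + offset.natAbs) offset with
  | none => ("", 0)  -- ValueError; outside Pre_
  | some o => (String.ofList (PySem.List.slice l (some offset) (some (o + 2))), o + 2)

-- ===== PRECONDITION & SPEC =====
-- one varint step: the 2-char slice at offset o parses as hex (some) and its 0x80 bit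
-- tells whether the loop continues (true) or stops (false); none = Python raises ValueError
def pvStep (l : List Char) (o : Int) : Option Bool :=
  (hex16? (PySem.List.slice l (some o) (some (o + 2)))).map (fun v => PySem.Int.band v 128 != 0)

-- Pre_: exactly the inputs where A returns (no ValueError): some chain of k continuation
-- pairs followed by a terminating pair, all parsing as hex
def Pre_Parse128Bit (utdata : String) (offset : Int) : Prop :=
  ∃ k ≤ utdata.toList.length,
    (∀ i < k, pvStep utdata.toList (offset + 2 * i) = some true) ∧
    pvStep utdata.toList (offset + 2 * k) = some false
instance (utdata : String) (offset : Int) : Decidable (Pre_Parse128Bit utdata offset) := by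
  unfold Pre_Parse128Bit; infer_instance

def pvWitness_Parse128Bit : String × Int := ("8105", 0)

def Spec_Parse128Bit (utdata : String) (offset : Int) (out : String × Int) : Prop :=
  out = Parse128Bit_alt utdata offset
instance (utdata : String) (offset : Int) (out : String × Int) :
    Decidable (Spec_Parse128Bit utdata offset out) := by unfold Spec_Parse128Bit; infer_instance

-- ===== CLAIM (what is proved, stated in full; the proofs are below) =====
def Claim_equal_Parse128Bit : Prop := ∀ (utdata : String) (offset : Int),
  Dom_Parse128Bit utdata offset → Pre_Parse128Bit utdata offset →
  Spec_Parse128Bit utdata offset (Parse128Bit utdata offset)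

-- ===== LEMMAS AND PROOFS =====

theorem hex16?_nil : hex16? ([] : List Char) = none := by decide

theorem slice_drop_take (l : List Char) (a b : Int) :
    PySem.List.slice l (some a) (some b) =
      (l.drop (PySem.List.clampIdx l.length a)).take
        (PySem.List.clampIdx l.length b - PySem.List.clampIdx l.length a) := by
  simp [PySem.List.slice]

theorem clamp_lt_of_valid (l : List Char) (o : Int) (b : Bool)
    (h : pvStep l o = some b) :
    PySem.List.clampIdx l.length o < PySem.List.clampIdx l.length (o + 2) := by
  rcases Option.map_eq_some_iff.mp h with ⟨v, hv, -⟩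
  by_contra hle
  push Not at hle
  rw [slice_drop_take] at hv
  have : PySem.List.clampIdx l.length (o + 2) - PySem.List.clampIdx l.length o = 0 := by omega
  rw [this] at hv
  simp only [List.take_zero, hex16?_nil] at hv
  simp at hv

theorem slice_append (l : List Char) (a b c : Int)
    (h1 : PySem.List.clampIdx l.length a ≤ PySem.List.clampIdx l.length b)
    (h2 : PySem.List.clampIdx l.length b ≤ PySem.List.clampIdx l.length c) :
    PySem.List.slice l (some a) (some b) ++ PySem.List.slice l (some b) (some c) =
      PySem.List.slice l (some a) (some c) := by
  rw [slice_drop_take, slice_drop_take, slice_drop_take]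
  set ca := PySem.List.clampIdx l.length a
  set cb := PySem.List.clampIdx l.length b
  set cc := PySem.List.clampIdx l.length c
  have hsum : cc - ca = (cb - ca) + (cc - cb) := by omega
  rw [hsum, List.take_add, List.drop_drop]
  have hb : ca + (cb - ca) = cb := by omega
  rw [hb]
theorem chain_slice (l : List Char) (k : Nat) : ∀ (o : Int),
    (∀ i < k, pvStep l (o + 2 * i) = some true) →
    pvStep l (o + 2 * k) = some false →
    PySem.List.clampIdx l.length o ≤ PySem.List.clampIdx l.length (o + 2 * k + 2) := by
  induction k with
  | zero =>
    intro o _ h0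
    have := clamp_lt_of_valid l o false (by simpa using h0)
    rw [show o + 2 * ((0:Nat):Int) + 2 = o + 2 by push_cast; ring]
    omega
  | succ m ih =>
    intro o h1 h0
    have hv0 : pvStep l o = some true := by simpa using h1 0 (by omega)
    have hstep := clamp_lt_of_valid l o true hv0
    have hshift : ∀ i < m, pvStep l ((o + 2) + 2 * i) = some true := by
      intro i hi
      have h := h1 (i + 1) (by omega)
      push_cast at h
      rw [show (o + 2) + 2 * (i : Int) = o + 2 * ((i : Int) + 1) by ring]
      exact h
    have h0' : pvStep l ((o + 2) + 2 * m) = some false := by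
      have h := h0
      push_cast at h
      rw [show (o + 2) + 2 * (m : Int) = o + 2 * ((m : Int) + 1) by ring]
      exact h
    have hih := ih (o + 2) hshift h0'
    have harg : o + 2 * ((m : Int) + 1) + 2 = (o + 2) + 2 * m + 2 := by ring
    push_cast
    rw [harg]
    omega

theorem loopB_eq (l : List Char) (k : Nat) : ∀ (o : Int) (fuel : Nat), k < fuel →
    (∀ i < k, pvStep l (o + 2 * i) = some true) →
    pvStep l (o + 2 * k) = some false →
    pvB_loop l fuel o = some (o + 2 * k) := by
  induction k with
  | zero =>
    intro o fuel hf h1 h0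
    obtain ⟨f, rfl⟩ : ∃ f, fuel = f + 1 := ⟨fuel - 1, by omega⟩
    rcases Option.map_eq_some_iff.mp (show pvStep l o = some false by simpa using h0) with ⟨v, hv, hb⟩
    simp [pvB_loop, hv, hb]
  | succ m ih =>
    intro o fuel hf h1 h0
    obtain ⟨f, rfl⟩ : ∃ f, fuel = f + 1 := ⟨fuel - 1, by omega⟩
    rcases Option.map_eq_some_iff.mp (show pvStep l o = some true by simpa using h1 0 (by omega)) with ⟨v, hv, hb⟩
    have hshift : ∀ i < m, pvStep l ((o + 2) + 2 * i) = some true := by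
      intro i hi
      have h := h1 (i + 1) (by omega)
      push_cast at h
      rw [show (o + 2) + 2 * (i : Int) = o + 2 * ((i : Int) + 1) by ring]
      exact h
    have h0' : pvStep l ((o + 2) + 2 * m) = some false := by
      have h := h0
      push_cast at h
      rw [show (o + 2) + 2 * (m : Int) = o + 2 * ((m : Int) + 1) by ring]
      exact h
    have hrec := ih (o + 2) f (by omega) hshift h0'
    simp only [pvB_loop, hv, hb, if_true]
    rw [hrec]
    congr 1
    push_cast
    ring

theorem loopA_eq (l : List Char) (k : Nat) : ∀ (o : Int) (data : List Char) (fuel : Nat), k < fuel →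
    (∀ i < k, pvStep l (o + 2 * i) = some true) →
    pvStep l (o + 2 * k) = some false →
    pvA_loop l fuel data o true =
      some (data ++ PySem.List.slice l (some o) (some (o + 2 * k + 2)), o + 2 * k + 2) := by
  induction k with
  | zero =>
    intro o data fuel hf h1 h0
    obtain ⟨f, rfl⟩ : ∃ f, fuel = f + 1 := ⟨fuel - 1, by omega⟩
    rcases Option.map_eq_some_iff.mp (show pvStep l o = some false by simpa using h0) with ⟨v, hv, hb⟩
    simp [pvA_loop, hv, hb]
    rw [pvA_loop.eq_def]
    simp
  | succ m ih =>
    intro o data fuel hf h1 h0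
    obtain ⟨f, rfl⟩ : ∃ f, fuel = f + 1 := ⟨fuel - 1, by omega⟩
    have hv0 : pvStep l o = some true := by simpa using h1 0 (by omega)
    rcases Option.map_eq_some_iff.mp hv0 with ⟨v, hv, hb⟩
    have hshift : ∀ i < m, pvStep l ((o + 2) + 2 * i) = some true := by
      intro i hi
      have h := h1 (i + 1) (by omega)
      push_cast at h
      rw [show (o + 2) + 2 * (i : Int) = o + 2 * ((i : Int) + 1) by ring]
      exact h
    have h0' : pvStep l ((o + 2) + 2 * m) = some false := by
      have h := h0
      push_cast at h
      rw [show (o + 2) + 2 * (m : Int) = o + 2 * ((m : Int) + 1) by ring]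
      exact h
    have hrec := ih (o + 2) (data ++ PySem.List.slice l (some o) (some (o + 2))) f (by omega) hshift h0'
    simp only [pvA_loop, hv, hb, if_true]
    rw [hrec, List.append_assoc,
      slice_append l o (o + 2) ((o + 2) + 2 * m + 2)
        (le_of_lt (clamp_lt_of_valid l o true hv0))
        (chain_slice l m (o + 2) hshift h0')]
    congr 2 <;> push_cast <;> ring_nf

-- ===== VERDICT (by name: the statement is the Claim_ definition above) =====
theorem Parse128Bit_spec : Claim_equal_Parse128Bit := by
  intro utdata offset _ hpre
  obtain ⟨k, hk, h1, h0⟩ := hpre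
  unfold Spec_Parse128Bit Parse128Bit Parse128Bit_alt
  cases k with
  | zero =>
    rcases Option.map_eq_some_iff.mp (show pvStep utdata.toList offset = some false by simpa using h0) with ⟨v, hv, hb⟩
    have hB := loopB_eq utdata.toList 0 offset (utdata.toList.length + 2 + offset.natAbs) (by omega)
      (by intro i hi; omega) (by simpa using h0)
    simp only [hv, hb, hB]
    rw [pvA_loop.eq_def]
    simp
  | succ m =>
    have hv0 : pvStep utdata.toList offset = some true := by simpa using h1 0 (by omega)
    rcases Option.map_eq_some_iff.mp hv0 with ⟨v, hv, hb⟩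
    have hshift : ∀ i < m, pvStep utdata.toList ((offset + 2) + 2 * i) = some true := by
      intro i hi
      have h := h1 (i + 1) (by omega)
      push_cast at h
      rw [show (offset + 2) + 2 * (i : Int) = offset + 2 * ((i : Int) + 1) by ring]
      exact h
    have h0' : pvStep utdata.toList ((offset + 2) + 2 * m) = some false := by
      have h := h0
      push_cast at h
      rw [show (offset + 2) + 2 * (m : Int) = offset + 2 * ((m : Int) + 1) by ring]
      exact h
    have hB := loopB_eq utdata.toList (m + 1) offset (utdata.toList.length + 2 + offset.natAbs)
      (by omega) h1 h0
    have hA := loopA_eq utdata.toList m (offset + 2)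
      (PySem.List.slice utdata.toList (some offset) (some (offset + 2)))
      (utdata.toList.length + 2 + offset.natAbs) (by omega) hshift h0'
    simp only [hv, hb, hB, hA]
    rw [slice_append utdata.toList offset (offset + 2) ((offset + 2) + 2 * m + 2)
      (le_of_lt (clamp_lt_of_valid utdata.toList offset true hv0))
      (chain_slice utdata.toList m (offset + 2) hshift h0')]
    have harg : offset + 2 * ((m : Int) + 1) + 2 = offset + 2 + 2 * m + 2 := by ring
    push_cast
    rw [harg]
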